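-- pv_equiv track=rewrite | github.com/rishikeshpuri/Algorithms-and-Data-Structure | queue/Given a stack of integers, how do you check whether each successive pair of numbers in the stack is consecutive or not.py | pairWiseConsecutive
-- ===== SOURCE A (Python) =====
-- def pairWiseConsecutive(stk):
--     auxStk = []
--     while len(stk)!=0:
--         auxStk.append(stk[-1])
--         stk.pop()
--     result = True
--     while len(auxStk)>1:
--         x = auxStk[-1]
--         auxStk.pop()
--         y = auxStk[-1]
--         auxStk.pop()
--
--         if abs(x - y) != 1:
--             result = False
--         stk.append(x)
--         stk.append(y)
--
--     if len(auxStk) == 1: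
--         stk.append(auxStk[-1])
--     return result
-- ===== SOURCE B (Python) =====
-- def pairWiseConsecutive(stk):
--     i = 0
--     while i + 1 < len(stk):
--         if abs(stk[i] - stk[i + 1]) != 1:
--             return False
--         i += 2
--     return True
-- ===== Notes on version B (the rewrite author's own statement) =====
-- stated objective: simpler
-- what changed: Replaces the two-stack transfer-pop-and-restore loops with a single index loop over disjoint pairs (stride 2), no auxiliary stack and no mutation of the argument.
import Mathlib
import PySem

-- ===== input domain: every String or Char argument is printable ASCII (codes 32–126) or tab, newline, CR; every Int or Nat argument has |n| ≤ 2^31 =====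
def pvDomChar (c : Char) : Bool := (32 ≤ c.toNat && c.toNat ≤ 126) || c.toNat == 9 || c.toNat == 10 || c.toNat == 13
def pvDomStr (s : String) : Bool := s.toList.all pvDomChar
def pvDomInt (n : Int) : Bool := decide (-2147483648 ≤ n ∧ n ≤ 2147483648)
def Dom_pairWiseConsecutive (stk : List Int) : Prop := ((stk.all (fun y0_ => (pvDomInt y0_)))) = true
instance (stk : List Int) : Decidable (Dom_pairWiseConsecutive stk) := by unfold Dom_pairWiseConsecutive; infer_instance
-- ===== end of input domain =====

-- B replaces A's two-stack transfer-and-restore with a direct two-at-a-time recursion (simpler);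
-- A mutates its argument but restores it to its original contents, so only the return value is at stake.

-- ===== PORT A =====
-- first loop: while len(stk)!=0: auxStk.append(stk[-1]); stk.pop()
def pwcFill (stk auxStk : List Int) : List Int :=
  if h : stk = [] then auxStk
  else pwcFill stk.dropLast (auxStk ++ [stk.getLast h])
termination_by stk.length
decreasing_by
  have h0 : 0 < stk.length := List.length_pos_of_ne_nil (by assumption)
  simp only [List.length_dropLast]; omega

-- second loop: while len(auxStk)>1: pop x, pop y; if abs(x-y)!=1: result=False;
-- stk.append(x); stk.append(y); then if len(auxStk)==1: stk.append(auxStk[-1]); value is (result, stk)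
def pwcLoop (auxStk stk : List Int) (result : Bool) : Bool × List Int :=
  if h : 1 < auxStk.length then
    have hne : auxStk ≠ [] := by intro hn; simp [hn] at h
    have hne1 : auxStk.dropLast ≠ [] := by
      intro hn
      have h2 : auxStk.length - 1 = 0 := by rw [← List.length_dropLast, hn]; rfl
      omega
    let x := auxStk.getLast hne
    let y := auxStk.dropLast.getLast hne1
    pwcLoop auxStk.dropLast.dropLast (stk ++ [x, y])
      (if (x - y).natAbs ≠ 1 then false else result)
  else if h1 : auxStk = [] then (result, stk)
  else (result, stk ++ [auxStk.getLast h1])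
termination_by auxStk.length
decreasing_by
  simp only [List.length_dropLast]
  have : 1 < auxStk.length := by assumption
  omega

def pairWiseConsecutive (stk : List Int) : Bool :=
  (pwcLoop (pwcFill stk []) [] true).1

-- ===== PORT B =====
-- i = 0; while i + 1 < len(stk): if abs(stk[i]-stk[i+1]) != 1: return False; i += 2; return True
-- (the guard keeps i and i+1 in range, so the indexing is exact)
def pwcGo (stk : List Int) (i : Nat) : Bool :=
  if h : i + 1 < stk.length then
    if (stk[i]'(Nat.lt_of_succ_lt h) - stk[i + 1]'h).natAbs ≠ 1 then false
    else pwcGo stk (i + 2)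
  else true
termination_by stk.length - i

def pairWiseConsecutive_alt (stk : List Int) : Bool := pwcGo stk 0

-- ===== PRECONDITION & SPEC =====
def Spec_pairWiseConsecutive (stk : List Int) (out : Bool) : Prop := out = pairWiseConsecutive_alt stk
instance (stk : List Int) (out : Bool) : Decidable (Spec_pairWiseConsecutive stk out) := by unfold Spec_pairWiseConsecutive; infer_instance

-- ===== CLAIM (what is proved, stated in full; the proofs are below) =====
def Claim_equal_pairWiseConsecutive : Prop := ∀ (stk : List Int), Dom_pairWiseConsecutive stk → Spec_pairWiseConsecutive stk (pairWiseConsecutive stk)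

-- ===== LEMMAS AND PROOFS =====

-- proof-internal reference shape: disjoint pairs checked front to back
def pwcOk : List Int → Bool
  | x :: y :: rest => if (x - y).natAbs ≠ 1 then false else pwcOk rest
  | _ => true

-- B's index loop from i is the pair check of the suffix stk.drop i.
theorem pwcGo_eq (stk : List Int) (i : Nat) : pwcGo stk i = pwcOk (stk.drop i) := by
  rw [pwcGo]
  split
  · next h =>
      rw [List.drop_eq_getElem_cons (by omega : i < stk.length),
          List.drop_eq_getElem_cons (by omega : i + 1 < stk.length)]
      simp only [pwcOk]
      rw [pwcGo_eq stk (i + 2)]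
  · next h =>
      have hlen : (stk.drop i).length ≤ 1 := by simp; omega
      match hd : stk.drop i with
      | [] => rfl
      | [z] => rfl
      | a :: b :: t => exfalso; rw [hd] at hlen; simp at hlen
termination_by stk.length - i

-- A's first loop reverses stk onto auxStk.
theorem pwcFill_eq (stk auxStk : List Int) : pwcFill stk auxStk = auxStk ++ stk.reverse := by
  induction stk using List.reverseRecOn generalizing auxStk with
  | nil => rw [pwcFill]; simp
  | append_singleton ys y ih =>
      rw [pwcFill]
      simp [ih]

-- A's second loop, run on l.reverse, ands `result` with B's two-at-a-time check of l.
theorem pwcLoop_fst (l : List Int) :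
    ∀ (stk : List Int) (result : Bool),
      (pwcLoop l.reverse stk result).1 = (result && pwcOk l) := by
  match l with
  | [] => intro stk result; rw [pwcLoop]; simp [pwcOk]
  | [z] => intro stk result; rw [pwcLoop]; simp [pwcOk]
  | x :: y :: rest =>
      intro stk result
      have ih := pwcLoop_fst rest
      rw [pwcLoop]
      have hrev : (x :: y :: rest).reverse = (rest.reverse ++ [y]) ++ [x] := by simp
      have hlen : 1 < (x :: y :: rest).reverse.length := by simp
      rw [dif_pos hlen]
      have hx : ∀ (h : (x :: y :: rest).reverse ≠ []), (x :: y :: rest).reverse.getLast h = x := by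
        intro h; rw [List.getLast_congr _ (by simp) hrev, List.getLast_concat]
      have hd : (x :: y :: rest).reverse.dropLast = rest.reverse ++ [y] := by
        rw [hrev, List.dropLast_concat]
      have hy : ∀ (h : rest.reverse ++ [y] ≠ []), (rest.reverse ++ [y]).getLast h = y := by
        intro h; rw [List.getLast_concat]
      simp only [hx, hd, hy, List.dropLast_concat, ih, pwcOk]
      by_cases hab : (x - y).natAbs = 1 <;> simp [hab]
termination_by l.length

-- ===== VERDICT (by name: the statement is the Claim_ definition above) =====
theorem pairWiseConsecutive_spec : Claim_equal_pairWiseConsecutive := by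
  intro stk _
  unfold Spec_pairWiseConsecutive pairWiseConsecutive pairWiseConsecutive_alt
  rw [pwcFill_eq, List.nil_append, pwcLoop_fst, Bool.true_and, pwcGo_eq, List.drop_zero]
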